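-- pv_equiv track=rewrite | github.com/zwx51/Make_Docx_by_Template | CreateDocx.py | blank
-- ===== SOURCE A (Python) =====
-- def blank(length,str):
--     strlen = len(str)
--     blank = int((length-strlen)/2)
--     bstr = str
--     while blank > 0:
--         bstr = " "+bstr
--         bstr = bstr+" "
--         blank -= 1
--     return bstr
-- ===== SOURCE B (Python) =====
-- def blank(length, str):
--     d = length - len(str)
--     k = max(d, 0) // 2
--     return " " * k + str + " " * k
-- ===== Notes on version B (the rewrite author's own statement) =====
-- stated objective: simpler
-- what changed: Replaces the character-by-character while-loop accumulation with a closed form: compute the pad width once (max(length-len(str),0)//2) and build the result by string repetition.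
import Mathlib
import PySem

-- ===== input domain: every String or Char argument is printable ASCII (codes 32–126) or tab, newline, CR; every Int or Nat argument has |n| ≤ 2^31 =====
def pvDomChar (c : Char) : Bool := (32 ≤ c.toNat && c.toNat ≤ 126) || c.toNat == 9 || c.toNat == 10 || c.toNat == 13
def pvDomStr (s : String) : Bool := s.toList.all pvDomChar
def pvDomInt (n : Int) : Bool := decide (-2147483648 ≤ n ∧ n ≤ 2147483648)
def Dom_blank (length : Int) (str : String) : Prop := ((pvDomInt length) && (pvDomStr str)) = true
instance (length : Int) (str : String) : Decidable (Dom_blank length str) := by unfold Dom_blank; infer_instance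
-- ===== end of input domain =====

-- B replaces A's while-loop accumulation with a closed-form pad computed once; objective: simpler.

-- ===== PORT A =====
-- the while loop: runs blank times, each pass prepending and appending one space
def blankLoopA : Nat → List Char → List Char
  | 0, s => s
  | n+1, s => blankLoopA n (' ' :: (s ++ [' ']))

def blank (length : Int) (str : String) : String :=
  let strlen : Int := (str.toList.length : Int)
  -- int((length-strlen)/2): float true division then int() truncates toward zero;
  -- exact on Dom (|values| ≪ 2^53), so it is Int.tdiv
  let b : Int := Int.tdiv (length - strlen) 2
  String.mk (blankLoopA b.toNat str.toList)

-- ===== PORT B =====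
def blank_alt (length : Int) (str : String) : String :=
  let d : Int := length - (str.toList.length : Int)
  let k : Nat := ((max d 0) / 2).toNat   -- max(d,0)//2
  String.mk (List.replicate k ' ' ++ str.toList ++ List.replicate k ' ')

-- ===== PRECONDITION & SPEC =====
def Spec_blank (length : Int) (str : String) (out : String) : Prop := out = blank_alt length str
instance (length : Int) (str : String) (out : String) : Decidable (Spec_blank length str out) := by unfold Spec_blank; infer_instance

-- ===== CLAIM (what is proved, stated in full; the proofs are below) =====
def Claim_equal_blank : Prop := ∀ (length : Int) (str : String), Dom_blank length str → Spec_blank length str (blank length str)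

-- ===== LEMMAS AND PROOFS =====
theorem replicate_append_cons {α : Type} (n : Nat) (a : α) (l : List α) :
    List.replicate n a ++ a :: l = a :: (List.replicate n a ++ l) := by
  induction n with
  | zero => simp
  | succ m ih => simp [List.replicate_succ, ih]

theorem blankLoopA_eq (n : Nat) (s : List Char) :
    blankLoopA n s = List.replicate n ' ' ++ s ++ List.replicate n ' ' := by
  induction n generalizing s with
  | zero => simp [blankLoopA]
  | succ m ih =>
      rw [blankLoopA, ih]
      simp [List.replicate_succ, List.append_assoc, replicate_append_cons]

theorem pad_eq (d : Int) : (Int.tdiv d 2).toNat = ((max d 0) / 2).toNat := by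
  by_cases h : (0:Int) ≤ d
  · rw [Int.tdiv_eq_ediv_of_nonneg h, max_eq_left h]
  · have h' : d ≤ 0 := by omega
    have h1 : Int.tdiv d 2 ≤ 0 := by
      have h2 : 0 ≤ Int.tdiv (-d) 2 := Int.tdiv_nonneg (by omega) (by norm_num)
      rw [show d = -(-d) by ring, Int.neg_tdiv]
      omega
    rw [max_eq_right h']
    omega

-- ===== VERDICT (by name: the statement is the Claim_ definition above) =====
theorem blank_spec : Claim_equal_blank := by
  intro length str _
  show blank length str = blank_alt length str
  simp only [blank, blank_alt, blankLoopA_eq, pad_eq]
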